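-- pv_equiv track=rewrite | github.com/Gravitar64/A-beautiful-code-in-Python | Teil_xx_Schach_bitboards.py | create_pieces_bb
-- ===== SOURCE A (Python) =====
-- def create_pieces_bb(position):
--   bb, all_pieces = {}, {}
--   w = b = 0
--   for i,fig in position.items():
--     board = 0 if fig not in bb else bb[fig]
--     board |= 1 << i
--     bb[fig]=board
--     if fig.isupper():
--       w |= board
--     else:
--       b |= board
--   all_pieces[True] = w
--   all_pieces[False] = b
--   occupied = w | b
--   return bb, all_pieces, occupied
-- ===== SOURCE B (Python) =====
-- def create_pieces_bb(position):
--   squares = list(position.items())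
--   figs = []
--   for _, fig in squares:
--     if fig not in figs:
--       figs.append(fig)
--   bb = {}
--   for fig in figs:
--     board = 0
--     for i, f in squares:
--       if f == fig:
--         board |= 1 << i
--     bb[fig] = board
--   w = b = 0
--   for i, fig in squares:
--     if fig.isupper():
--       w |= 1 << i
--     else:
--       b |= 1 << i
--   return bb, {True: w, False: b}, w | b
-- ===== Notes on version B (the rewrite author's own statement) =====
-- stated objective: alternative
-- what changed: A builds the bitboard dict incrementally (read-modify-write per square) and folds each partial board into w/b as it goes; B never updates a dict entry: it collects the distinct piece types, then for each type gathers its board by scanning the squares (a group-by gather), and computes white/black occupancy in a separate pass directly from the squares' bits (if fig.isupper(): w |= 1<<i), never touching the boards; correct because each final board and each occupancy is exactly the OR of the 1<<i bits of its squares.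
import Mathlib
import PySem

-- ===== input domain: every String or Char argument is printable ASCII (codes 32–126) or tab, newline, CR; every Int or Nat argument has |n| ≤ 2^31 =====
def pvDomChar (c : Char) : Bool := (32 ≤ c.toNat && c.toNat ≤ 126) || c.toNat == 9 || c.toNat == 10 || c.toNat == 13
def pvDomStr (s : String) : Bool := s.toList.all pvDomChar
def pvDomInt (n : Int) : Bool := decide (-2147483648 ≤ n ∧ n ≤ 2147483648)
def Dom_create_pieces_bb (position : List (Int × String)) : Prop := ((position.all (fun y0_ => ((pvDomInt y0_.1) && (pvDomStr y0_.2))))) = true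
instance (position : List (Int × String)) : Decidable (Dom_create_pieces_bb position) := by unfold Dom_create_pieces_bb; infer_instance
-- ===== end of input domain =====

-- B replaces A's incremental dict building with a group-by gather: it collects the distinct piece
-- types first, scans the squares once per type to assemble that type's board, and computes the
-- white/black occupancies in a separate pass directly from the squares' bits; objective: alternative.

-- shared helper: Python's str.isupper() — at least one cased character and no lowercase one
-- (exact on the ASCII domain, where the cased characters are exactly A-Z and a-z)
def pyStrIsupper (s : String) : Bool :=
  (s.toList.any PySem.Chars.isupper) && (s.toList.all (fun c => !(PySem.Chars.islower c)))

-- ===== PORT A =====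
-- loop body of A: board = 0 if fig not in bb else bb[fig]; board |= 1 << i; bb[fig] = board; w/b |= board
-- (1 << i is exact for 0 ≤ i, which Pre_ guarantees; Python raises ValueError on a negative shift)
def stepA (s : PySem.Dict String Int × Int × Int) (p : Int × String) :
    PySem.Dict String Int × Int × Int :=
  let board := if !(s.1.contains p.2) then 0 else s.1.getD p.2 0
  let board := PySem.Int.bor board ((1 : Int) <<< p.1.toNat)
  let bb := s.1.insert p.2 board
  if pyStrIsupper p.2 then (bb, PySem.Int.bor s.2.1 board, s.2.2)
  else (bb, s.2.1, PySem.Int.bor s.2.2 board)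

def create_pieces_bb (position : List (Int × String)) : (List (String × Int)) × (List (Bool × Int)) × Int :=
  let s := position.foldl stepA (PySem.Dict.empty, 0, 0)
  (s.1.items, [(true, s.2.1), (false, s.2.2)], PySem.Int.bor s.2.1 s.2.2)

-- ===== PORT B =====
-- inner gather loop of B: board |= 1 << i for every square (i, f) whose figure f equals fig
def boardStep (fig : String) (a : Int) (p : Int × String) : Int :=
  if p.2 == fig then PySem.Int.bor a ((1 : Int) <<< p.1.toNat) else a

-- occupancy loop of B: if fig.isupper(): w |= 1 << i else: b |= 1 << i
def occStep (s : Int × Int) (p : Int × String) : Int × Int :=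
  if pyStrIsupper p.2 then (PySem.Int.bor s.1 ((1 : Int) <<< p.1.toNat), s.2)
  else (s.1, PySem.Int.bor s.2 ((1 : Int) <<< p.1.toNat))

def create_pieces_bb_alt (position : List (Int × String)) : (List (String × Int)) × (List (Bool × Int)) × Int :=
  -- figs: the distinct figures in first-appearance order ('if fig not in figs: figs.append(fig)')
  let figs : PySem.Set String := position.foldl (fun fs p => PySem.Set.add fs p.2) PySem.Set.empty
  -- bb: for each distinct figure, gather its board by a scan over the squares; the keys are
  -- distinct, so filling the dict appends one pair per figure — the assoc list is this map
  let bb := figs.map (fun fig => (fig, position.foldl (boardStep fig) 0))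
  let wb := position.foldl occStep (0, 0)
  (bb, [(true, wb.1), (false, wb.2)], PySem.Int.bor wb.1 wb.2)

-- ===== PRECONDITION & SPEC =====
-- Pre_ excludes only the inputs on which A raises: a negative square index i makes 1 << i a ValueError.
def Pre_create_pieces_bb (position : List (Int × String)) : Prop :=
  ∀ p ∈ position, 0 ≤ p.1
instance (position : List (Int × String)) : Decidable (Pre_create_pieces_bb position) := by
  unfold Pre_create_pieces_bb; infer_instance

def pvWitness_create_pieces_bb : (List (Int × String)) := [(0, "K"), (5, "p"), (9, "K")]

def Spec_create_pieces_bb (position : List (Int × String)) (out : (List (String × Int)) × (List (Bool × Int)) × Int) : Prop := out = create_pieces_bb_alt position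
instance (position : List (Int × String)) (out : (List (String × Int)) × (List (Bool × Int)) × Int) : Decidable (Spec_create_pieces_bb position out) := by unfold Spec_create_pieces_bb; infer_instance

-- ===== CLAIM (what is proved, stated in full; the proofs are below) =====
def Claim_equal_create_pieces_bb : Prop := ∀ (position : List (Int × String)), Dom_create_pieces_bb position → Pre_create_pieces_bb position → Spec_create_pieces_bb position (create_pieces_bb position)

-- ===== LEMMAS AND PROOFS =====

theorem pvBorNN {a b : Int} (ha : 0 ≤ a) (hb : 0 ≤ b) : 0 ≤ PySem.Int.bor a b := by
  lift a to ℕ using ha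
  lift b to ℕ using hb
  simp

-- w absorbs g ⇒ w absorbs g again after both pick up the new bit x  ((w|x)|(g|x) = w|x)
theorem pvBorAbsorb1 {w g x : Int} (hw : 0 ≤ w) (hg : 0 ≤ g) (hx : 0 ≤ x)
    (h : PySem.Int.bor w g = w) :
    PySem.Int.bor (PySem.Int.bor w x) (PySem.Int.bor g x) = PySem.Int.bor w x := by
  lift w to ℕ using hw; lift g to ℕ using hg; lift x to ℕ using hx
  simp only [PySem.Int.bor_natCast] at h ⊢
  have h' : w ||| g = w := by exact_mod_cast h
  have hn : (w ||| x) ||| (g ||| x) = w ||| x := by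
    rw [Nat.lor_assoc, ← Nat.lor_assoc x g x, Nat.lor_comm x g, Nat.lor_assoc g x x,
        Nat.or_self, ← Nat.lor_assoc, h']
  exact_mod_cast hn

-- w absorbs g ⇒ so does w with an extra bit  ((w|x)|g = w|x)
theorem pvBorAbsorb2 {w g x : Int} (hw : 0 ≤ w) (hg : 0 ≤ g) (hx : 0 ≤ x)
    (h : PySem.Int.bor w g = w) :
    PySem.Int.bor (PySem.Int.bor w x) g = PySem.Int.bor w x := by
  lift w to ℕ using hw; lift g to ℕ using hg; lift x to ℕ using hx
  simp only [PySem.Int.bor_natCast] at h ⊢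
  have h' : w ||| g = w := by exact_mod_cast h
  have hn : (w ||| x) ||| g = w ||| x := by
    rw [Nat.lor_assoc, Nat.lor_comm x g, ← Nat.lor_assoc, h']
  exact_mod_cast hn

-- w absorbs g ⇒ OR-ing in g|x is OR-ing in x  (w|(g|x) = w|x)
theorem pvBorAbsorb3 {w g x : Int} (hw : 0 ≤ w) (hg : 0 ≤ g) (hx : 0 ≤ x)
    (h : PySem.Int.bor w g = w) :
    PySem.Int.bor w (PySem.Int.bor g x) = PySem.Int.bor w x := by
  lift w to ℕ using hw; lift g to ℕ using hg; lift x to ℕ using hx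
  simp only [PySem.Int.bor_natCast] at h ⊢
  have h' : w ||| g = w := by exact_mod_cast h
  have hn : w ||| (g ||| x) = w ||| x := by rw [← Nat.lor_assoc, h']
  exact_mod_cast hn

theorem pvShiftNN (p : Int × String) : (0 : Int) ≤ (1 : Int) <<< p.1.toNat := by
  rw [Int.shiftLeft_eq]; positivity

theorem getD_nonneg (d : PySem.Dict String Int) (k : String)
    (hd : ∀ p ∈ d.items, 0 ≤ p.2) : 0 ≤ d.getD k 0 := by
  simp only [PySem.Dict.getD, PySem.Dict.get?]
  cases hf : d.items.find? (fun p => p.1 == k) with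
  | none => simp
  | some p => simpa using hd p (List.mem_of_find?_eq_some hf)

-- A's dict update, in isolation (board_eq folds A's redundant contains-test away)
def dictStep (d : PySem.Dict String Int) (p : Int × String) : PySem.Dict String Int :=
  d.insert p.2 (PySem.Int.bor (d.getD p.2 0) ((1 : Int) <<< p.1.toNat))

theorem board_eq (d : PySem.Dict String Int) (k : String) :
    (if !(d.contains k) then 0 else d.getD k 0) = d.getD k 0 := by
  cases h : d.contains k with
  | false => simp [PySem.Dict.getD_of_not_contains (h := h)]
  | true => simp

-- the two separated occupancy accumulators
def wStep (a : Int) (p : Int × String) : Int :=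
  if pyStrIsupper p.2 then PySem.Int.bor a ((1 : Int) <<< p.1.toNat) else a
def bStep (a : Int) (p : Int × String) : Int :=
  if pyStrIsupper p.2 then a else PySem.Int.bor a ((1 : Int) <<< p.1.toNat)

-- invariant of A's loop state: keys unique, everything nonnegative, and w (resp. b) already
-- absorbs the stored board of every uppercase (resp. non-uppercase) figure
def AInv (d : PySem.Dict String Int) (w b : Int) : Prop :=
  d.keys.Nodup ∧ (∀ p ∈ d.items, 0 ≤ p.2) ∧ 0 ≤ w ∧ 0 ≤ b ∧
  (∀ k, pyStrIsupper k = true → PySem.Int.bor w (d.getD k 0) = w) ∧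
  (∀ k, pyStrIsupper k = false → PySem.Int.bor b (d.getD k 0) = b)

theorem AInv_step (d : PySem.Dict String Int) (w b : Int) (p : Int × String)
    (h : AInv d w b) : AInv (dictStep d p) (wStep w p) (bStep b p) := by
  obtain ⟨hK, hV, hw, hb, hW, hB⟩ := h
  have hg : 0 ≤ d.getD p.2 0 := getD_nonneg d p.2 hV
  have hx := pvShiftNN p
  have hv : 0 ≤ PySem.Int.bor (d.getD p.2 0) ((1 : Int) <<< p.1.toNat) := pvBorNN hg hx
  refine ⟨PySem.Dict.nodup_keys_insert d p.2 _ hK, ?_, ?_, ?_, ?_, ?_⟩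
  · intro q hq
    rcases (PySem.Dict.mem_items_insert _ _ _ _).mp hq with h | ⟨h, _⟩
    · rw [h]; exact hv
    · exact hV q h
  · unfold wStep; split
    · exact pvBorNN hw hx
    · exact hw
  · unfold bStep; split
    · exact hb
    · exact pvBorNN hb hx
  · intro k hk
    simp only [dictStep, PySem.Dict.getD_insert, wStep]
    cases hp : pyStrIsupper p.2 with
    | true =>
      simp only [if_true]
      split
      · next he =>
        subst he
        exact pvBorAbsorb1 hw hg hx (hW p.2 hk)
      · exact pvBorAbsorb2 hw (getD_nonneg d k hV) hx (hW k hk)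
    | false =>
      simp only [Bool.false_eq_true, if_false]
      split
      · next he => rw [he] at hk; rw [hk] at hp; cases hp
      · exact hW k hk
  · intro k hk
    simp only [dictStep, PySem.Dict.getD_insert, bStep]
    cases hp : pyStrIsupper p.2 with
    | true =>
      simp only [if_true]
      split
      · next he => rw [he] at hk; rw [hk] at hp; cases hp
      · exact hB k hk
    | false =>
      simp only [Bool.false_eq_true, if_false]
      split
      · next he =>
        subst he
        exact pvBorAbsorb1 hb hg hx (hB p.2 hk)
      · exact pvBorAbsorb2 hb (getD_nonneg d k hV) hx (hB k hk)

-- one step of A's loop is the three separated steps, given the invariant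
theorem stepA_eq (d : PySem.Dict String Int) (w b : Int) (p : Int × String)
    (h : AInv d w b) : stepA (d, w, b) p = (dictStep d p, wStep w p, bStep b p) := by
  obtain ⟨hK, hV, hw, hb, hW, hB⟩ := h
  have hg : 0 ≤ d.getD p.2 0 := getD_nonneg d p.2 hV
  have hx := pvShiftNN p
  simp only [stepA, dictStep, wStep, bStep, board_eq]
  cases hp : pyStrIsupper p.2 with
  | true =>
    simp only [if_true]
    exact Prod.ext rfl (Prod.ext (pvBorAbsorb3 hw hg hx (hW p.2 hp)) rfl)
  | false =>
    simp only [Bool.false_eq_true, if_false]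
    exact Prod.ext rfl (Prod.ext rfl (pvBorAbsorb3 hb hg hx (hB p.2 hp)))

-- A's single loop is the three separated folds
theorem loopA_eq (l : List (Int × String)) (d : PySem.Dict String Int) (w b : Int)
    (h : AInv d w b) :
    l.foldl stepA (d, w, b) = (l.foldl dictStep d, l.foldl wStep w, l.foldl bStep b) := by
  induction l generalizing d w b with
  | nil => rfl
  | cons p t ih =>
    simp only [List.foldl_cons, stepA_eq d w b p h]
    exact ih _ _ _ (AInv_step d w b p h)

-- dict fold: lookups of the final dict are B's gather fold
theorem dict_getD_eq (l : List (Int × String)) (d : PySem.Dict String Int) (k : String) :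
    (l.foldl dictStep d).getD k 0 = l.foldl (boardStep k) (d.getD k 0) := by
  induction l generalizing d with
  | nil => rfl
  | cons p t ih =>
    simp only [List.foldl_cons, ih (dictStep d p)]
    congr 1
    simp only [dictStep, PySem.Dict.getD_insert, boardStep]
    by_cases he : p.2 = k
    · subst he; simp
    · simp [he, Ne.symm he]

-- keys of the final dict are B's distinct-figure set
theorem dict_keys_eq (l : List (Int × String)) :
    (l.foldl dictStep PySem.Dict.empty).keys
      = l.foldl (fun fs p => PySem.Set.add fs p.2) PySem.Set.empty := by
  have h1 : (l.foldl dictStep PySem.Dict.empty).keys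
      = PySem.Set.update (PySem.Dict.empty (κ := String) (ν := Int)).keys
          (l.map (fun p : Int × String => p.2)) :=
    PySem.Dict.keys_foldl_insert_key l (fun p : Int × String => p.2)
      (fun d q => PySem.Int.bor (d.getD q.2 0) ((1 : Int) <<< q.1.toNat)) _
  rw [h1, PySem.Dict.keys_empty, PySem.Set.update_map_eq_foldl_add]
  rfl

theorem dict_keys_nodup (l : List (Int × String)) :
    (l.foldl dictStep PySem.Dict.empty).keys.Nodup :=
  PySem.Dict.nodup_keys_foldl_insert_key l (fun p : Int × String => p.2)
    (fun d q => PySem.Int.bor (d.getD q.2 0) ((1 : Int) <<< q.1.toNat)) _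
    PySem.Dict.nodup_keys_empty

-- B's pair-fold splits into the two accumulators
theorem occ_split (l : List (Int × String)) :
    l.foldl occStep (0, 0) = (l.foldl wStep 0, l.foldl bStep 0) := by
  have h : occStep = fun (s : Int × Int) (p : Int × String) => (wStep s.1 p, bStep s.2 p) := by
    funext s p
    unfold occStep wStep bStep
    split <;> rfl
  rw [h, PySem.List.foldl_prod_mk]

-- ===== VERDICT (by name: the statement is the Claim_ definition above) =====
theorem create_pieces_bb_spec : Claim_equal_create_pieces_bb := by
  intro position _ _
  show create_pieces_bb position = create_pieces_bb_alt position
  have h0 : AInv PySem.Dict.empty 0 0 := by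
    refine ⟨PySem.Dict.nodup_keys_empty, ?_, le_rfl, le_rfl, ?_, ?_⟩
    · intro p hp; simp [PySem.Dict.empty] at hp
    · intro k _; simp [PySem.Dict.getD_empty]
    · intro k _; simp [PySem.Dict.getD_empty]
  have hitems : (position.foldl dictStep PySem.Dict.empty).items
      = (position.foldl (fun fs p => PySem.Set.add fs p.2) PySem.Set.empty).map
          (fun fig => (fig, position.foldl (boardStep fig) 0)) := by
    rw [PySem.Dict.items_eq_map_keys _ (dict_keys_nodup position) 0, dict_keys_eq]
    exact List.map_congr_left (fun k _ => by
      rw [dict_getD_eq, PySem.Dict.getD_empty])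
  simp only [create_pieces_bb, create_pieces_bb_alt,
    loopA_eq position PySem.Dict.empty 0 0 h0, occ_split, hitems]
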